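-- pv_equiv track=rewrite | github.com/mohenjo/CodongDojang | solutions/제곱사이클/main.py | sqr_seq
-- ===== SOURCE A (Python) =====
-- def sqr_seq(alist:list):
--     if len(alist) >= 100:
--         return alist
--
--     chk = alist[-1]
--     nextval = sum(int(s)**2 for s in str(chk)) if len(str(chk)) > 1 else chk**2
--     if nextval in alist:
--         return alist
--
--     alist.append(nextval)
--     return sqr_seq(alist)
-- ===== SOURCE B (Python) =====
-- def sqr_seq(alist: list):
--     # Iterative rewrite with a seen-set; mutates alist in place like A and returns it.
--     seen = set(alist)
--     while len(alist) < 100: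
--         chk = alist[-1]
--         s = str(chk)
--         nextval = sum(int(d) ** 2 for d in s) if len(s) > 1 else chk ** 2
--         if nextval in seen:
--             break
--         seen.add(nextval)
--         alist.append(nextval)
--     return alist
-- ===== Notes on version B (the rewrite author's own statement) =====
-- stated objective: idiomatic
-- what changed: Replaces A's tail recursion with an iterative while-loop that keeps a seen-set for the repeat test instead of rescanning the list.
-- outside the precondition, e.g. on sqr_seq([-1]): A raises ValueError, B raises ValueError; on sqr_seq([]): A raises IndexError, B raises IndexError
import Mathlib
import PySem

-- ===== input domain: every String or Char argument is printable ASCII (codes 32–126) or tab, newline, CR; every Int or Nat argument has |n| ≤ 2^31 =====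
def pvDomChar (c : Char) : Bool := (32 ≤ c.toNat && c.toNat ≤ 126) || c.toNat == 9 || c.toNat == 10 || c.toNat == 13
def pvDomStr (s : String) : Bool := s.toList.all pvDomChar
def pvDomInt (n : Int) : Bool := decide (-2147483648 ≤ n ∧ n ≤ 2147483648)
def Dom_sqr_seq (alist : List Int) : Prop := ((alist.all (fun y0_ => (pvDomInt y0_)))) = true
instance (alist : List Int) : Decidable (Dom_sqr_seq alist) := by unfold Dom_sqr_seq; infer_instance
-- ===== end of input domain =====

-- B rewrites A's tail recursion as an iterative loop with a seen-set; both mutate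
-- alist in place in Python (equivalence here is about the returned list value).

-- ===== PORT A =====
-- nextval = sum(int(s)**2 for s in str(chk)) if len(str(chk)) > 1 else chk**2
-- int(d) on a single char ported via PySem.Int.ofStr?; '-' (none, ValueError) is outside Pre_, defaulted to 0.
def pvNextval (chk : Int) : Int :=
  let s := (PySem.Int.toStr chk).toList
  if 1 < s.length then
    s.foldl (fun acc c => acc + ((PySem.Int.ofStr? (String.mk [c])).getD 0) ^ 2) 0
  else chk ^ 2

def sqr_seq (alist : List Int) : List Int :=
  if 100 ≤ alist.length then alist
  else
    match PySem.List.pyGet? alist (-1) with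
    | none => alist  -- IndexError (empty list), outside Pre_
    | some chk =>
      let nextval := pvNextval chk
      if nextval ∈ alist then alist
      else sqr_seq (alist ++ [nextval])
termination_by 100 - alist.length
decreasing_by simp; omega

-- ===== PORT B =====
-- while len(alist) < 100: … ; fuel 100 bounds the loop (each pass appends one element,
-- so at most 100 passes can satisfy len(alist) < 100; at fuel 0 the length is ≥ 100).
def sqr_seq_altLoop (fuel : Nat) (alist : List Int) (seen : PySem.Set Int) : List Int :=
  match fuel with
  | 0 => alist
  | fuel + 1 =>
    if alist.length < 100 then
      match PySem.List.pyGet? alist (-1) with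
      | none => alist  -- IndexError, outside Pre_
      | some chk =>
        let s := (PySem.Int.toStr chk).toList
        let nextval :=
          if 1 < s.length then
            s.foldl (fun acc c => acc + ((PySem.Int.ofStr? (String.mk [c])).getD 0) ^ 2) 0
          else chk ^ 2
        if nextval ∈ seen then alist
        else sqr_seq_altLoop fuel (alist ++ [nextval]) (PySem.Set.add seen nextval)
    else alist

def sqr_seq_alt (alist : List Int) : List Int :=
  sqr_seq_altLoop 100 alist (PySem.Set.ofList alist)

-- ===== PRECONDITION & SPEC =====
-- Pre_ excludes exactly the inputs where Python A raises: the empty list (IndexError on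
-- alist[-1]) and a negative last element with length < 100 (ValueError from int('-')).
def Pre_sqr_seq (alist : List Int) : Prop :=
  100 ≤ alist.length ∨ (alist ≠ [] ∧ 0 ≤ (PySem.List.pyGet? alist (-1)).getD 0)
instance (alist : List Int) : Decidable (Pre_sqr_seq alist) := by unfold Pre_sqr_seq; infer_instance

def pvWitness_sqr_seq : List Int := [5]

def Spec_sqr_seq (alist : List Int) (out : List Int) : Prop := out = sqr_seq_alt alist
instance (alist : List Int) (out : List Int) : Decidable (Spec_sqr_seq alist out) := by unfold Spec_sqr_seq; infer_instance

-- ===== CLAIM (what is proved, stated in full; the proofs are below) =====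
def Claim_equal_sqr_seq : Prop := ∀ (alist : List Int), Dom_sqr_seq alist → Pre_sqr_seq alist → Spec_sqr_seq alist (sqr_seq alist)

-- ===== LEMMAS AND PROOFS =====

-- Loop invariant: if seen holds exactly alist's elements and fuel covers the remaining
-- room up to length 100, B's loop computes A's recursion.
theorem altLoop_eq_sqr_seq (fuel : Nat) (alist : List Int) (seen : PySem.Set Int)
    (hmem : ∀ x, x ∈ seen ↔ x ∈ alist) (hfuel : 100 ≤ alist.length + fuel) :
    sqr_seq_altLoop fuel alist seen = sqr_seq alist := by
  induction fuel generalizing alist seen with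
  | zero =>
    rw [sqr_seq_altLoop, sqr_seq]
    simp only [if_pos (by omega : 100 ≤ alist.length)]
  | succ n ih =>
    rw [sqr_seq_altLoop, sqr_seq]
    by_cases h : alist.length < 100
    · rw [if_pos h, if_neg (by omega)]
      cases hget : PySem.List.pyGet? alist (-1) with
      | none => rfl
      | some chk =>
        simp only [pvNextval]
        set s := (PySem.Int.toStr chk).toList with hs
        set nextval := (if 1 < s.length then
            s.foldl (fun acc c => acc + ((PySem.Int.ofStr? (String.mk [c])).getD 0) ^ 2) 0
          else chk ^ 2) with hnv
        by_cases hin : nextval ∈ alist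
        · rw [if_pos ((hmem nextval).mpr hin), if_pos hin]
        · rw [if_neg (fun hc => hin ((hmem nextval).mp hc)), if_neg hin]
          apply ih
          · intro x
            rw [PySem.Set.mem_add, hmem x, List.mem_append, List.mem_singleton]
          · simp; omega
    · rw [if_neg h, if_pos (by omega)]

-- ===== VERDICT (by name: the statement is the Claim_ definition above) =====
theorem sqr_seq_spec : Claim_equal_sqr_seq := by
  intro alist _ _
  unfold Spec_sqr_seq sqr_seq_alt
  exact (altLoop_eq_sqr_seq 100 alist (PySem.Set.ofList alist)
    (fun x => PySem.Set.mem_ofList alist x) (by omega)).symm
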